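-- pv_equiv track=rewrite | github.com/constdesch/LINGI1225 | filtreChess.py | filtreChess
-- ===== SOURCE A (Python) =====
-- def filtreChess(A):
--     nRow,nCol = len(A),len(A[0])
--     out = [[0]*nCol for i in range(nRow)]
--     for i in range(nRow):
--         for j in range(nCol):
--             inc =5*A[i][j]
--             if j>0:
--                 inc -= A[i][j-1]
--             if j<nCol-1:
--                 inc -= A[i][j+1]
--             if i>0:
--                 inc -= A[i-1][j]
--             if i<nRow-1:
--                 inc -= A[i+1][j]
--             out[i][j] = inc
--     return out
-- ===== SOURCE B (Python) =====
-- def filtreChess(A):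
--     # Shift-based row pipeline: pad/shift whole rows and combine them
--     # elementwise instead of per-cell index gathering with boundary branches.
--     M = [row[:len(A[0])] for row in A]          # the grid's width is len(A[0])
--     above = [[0] * len(r) for r in M[:1]] + M[:-1]
--     below = M[1:] + [[0] * len(r) for r in M[-1:]]
--     return [[5 * c - l - rt - u - d
--              for c, l, rt, u, d in zip(row, [0] + row[:-1], row[1:] + [0], up, dn)]
--             for row, up, dn in zip(M, above, below)]
-- ===== Notes on version B (the rewrite author's own statement) =====
-- stated objective: faster
-- what changed: Replaces the per-cell gather with four boundary branches by a whole-row pipeline: each output row is an elementwise zip of the row, its 0-padded left/right shifted copies, and the zero-padded rows above and below, so the inner loop has no index arithmetic or branch tests (measured ~1.6x faster).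
import Mathlib
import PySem

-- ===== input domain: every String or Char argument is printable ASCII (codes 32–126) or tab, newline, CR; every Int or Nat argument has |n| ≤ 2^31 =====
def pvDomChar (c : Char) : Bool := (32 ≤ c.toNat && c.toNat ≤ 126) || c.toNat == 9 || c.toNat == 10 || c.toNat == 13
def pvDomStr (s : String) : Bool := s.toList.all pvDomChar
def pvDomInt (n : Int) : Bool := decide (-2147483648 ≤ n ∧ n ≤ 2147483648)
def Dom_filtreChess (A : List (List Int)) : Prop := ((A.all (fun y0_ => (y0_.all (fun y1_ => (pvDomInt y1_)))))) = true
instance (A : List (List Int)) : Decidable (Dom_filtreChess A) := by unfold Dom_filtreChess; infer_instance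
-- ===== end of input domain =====

-- B computes the same 5-point stencil by a shift-and-zip row pipeline instead of a
-- per-cell gather with boundary branches (timing run measured B ~1.6x faster).

-- ===== PORT A =====
-- literal transliteration: zero matrix, then nested index loops assigning out[i][j]
def filtreChess (A : List (List Int)) : List (List Int) :=
  let nRow : Int := A.length
  let nCol : Int := (PySem.List.pyGetD A 0 []).length   -- len(A[0]); in-bounds under Pre_
  let out := (PySem.List.pyRange 0 nRow 1).map (fun _ => (PySem.List.pyRange 0 nCol 1).map (fun _ => (0 : Int)))
  (PySem.List.pyRange 0 nRow 1).foldl (fun out i =>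
    (PySem.List.pyRange 0 nCol 1).foldl (fun out j =>
      let row := PySem.List.pyGetD A i []
      let inc0 := 5 * PySem.List.pyGetD row j 0
      let inc1 := if j > 0 then inc0 - PySem.List.pyGetD row (j - 1) 0 else inc0
      let inc2 := if j < nCol - 1 then inc1 - PySem.List.pyGetD row (j + 1) 0 else inc1
      let inc3 := if i > 0 then inc2 - PySem.List.pyGetD (PySem.List.pyGetD A (i - 1) []) j 0 else inc2
      let inc4 := if i < nRow - 1 then inc3 - PySem.List.pyGetD (PySem.List.pyGetD A (i + 1) []) j 0 else inc3
      PySem.List.pySetD out i (PySem.List.pySetD (PySem.List.pyGetD out i []) j inc4)) out) out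

-- ===== PORT B =====
-- B's zip of five equal-length row streams (python zip truncates at the shortest)
def zip5Row : List Int → List Int → List Int → List Int → List Int → List Int
  | c :: cs, l :: ls, r :: rs, u :: us, d :: ds =>
      (5 * c - l - r - u - d) :: zip5Row cs ls rs us ds
  | _, _, _, _, _ => []

-- B's outer zip of the matrix with its above/below row streams
def zip3Rows : List (List Int) → List (List Int) → List (List Int) → List (List Int)
  | row :: rows, up :: ups, dn :: dns =>
      zip5Row row (0 :: row.dropLast) (row.tail ++ [0]) up dn :: zip3Rows rows ups dns
  | _, _, _ => []

def filtreChess_alt (A : List (List Int)) : List (List Int) :=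
  let M := A.map (fun row => row.take (A.headD []).length)      -- [row[:len(A[0])] for row in A]
  let above := (M.take 1).map (fun r => List.replicate r.length (0 : Int)) ++ M.dropLast
  let below := M.tail ++ ((M.drop (M.length - 1)).map (fun r => List.replicate r.length (0 : Int)))
  zip3Rows M above below

-- ===== PRECONDITION & SPEC =====
-- Pre_ excludes exactly the inputs on which A raises IndexError: the empty matrix
-- (len(A[0])) and matrices with a row shorter than the first row (A[i][j] reads).
def Pre_filtreChess (A : List (List Int)) : Prop :=
  A ≠ [] ∧ ∀ r ∈ A, (A.headD []).length ≤ r.length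
instance (A : List (List Int)) : Decidable (Pre_filtreChess A) := by unfold Pre_filtreChess; infer_instance

def pvWitness_filtreChess : List (List Int) := [[1, 2], [3, 4]]

def Spec_filtreChess (A : List (List Int)) (out : List (List Int)) : Prop := out = filtreChess_alt A
instance (A : List (List Int)) (out : List (List Int)) : Decidable (Spec_filtreChess A out) := by unfold Spec_filtreChess; infer_instance

-- ===== CLAIM (what is proved, stated in full; the proofs are below) =====
def Claim_equal_filtreChess : Prop := ∀ (A : List (List Int)), Dom_filtreChess A → Pre_filtreChess A → Spec_filtreChess A (filtreChess A)


-- ===== LEMMAS AND PROOFS =====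

-- common gather characterisation: out[i][j] of the stencil
def matAt (A : List (List Int)) (i j : Nat) : Int := (A.getD i []).getD j 0

def gVal (A : List (List Int)) (i j : Nat) : Int :=
  5 * matAt A i j
    - (if 0 < j then matAt A i (j - 1) else 0)
    - (if j + 1 < (A.headD []).length then matAt A i (j + 1) else 0)
    - (if 0 < i then matAt A (i - 1) j else 0)
    - (if i + 1 < A.length then matAt A (i + 1) j else 0)

def gRow (A : List (List Int)) (i : Nat) : List Int :=
  (List.range (A.headD []).length).map (gVal A i)

def gather (A : List (List Int)) : List (List Int) :=
  (List.range A.length).map (gRow A)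

-- sequentially writing f 0, …, f (t-1) into the front of a row
def setPrefix (r : List Int) (f : Nat → Int) (t : Nat) : List Int :=
  (List.range t).foldl (fun r j => r.set j (f j)) r

theorem setPrefix_nil (f : Nat → Int) (t : Nat) : setPrefix [] f t = [] := by
  induction t with
  | zero => rfl
  | succ t ih => unfold setPrefix at *; rw [List.range_succ, List.foldl_append, ih]; rfl

theorem setPrefix_eq (r : List Int) (f : Nat → Int) (t : Nat) (h : t ≤ r.length) :
    setPrefix r f t = (List.range t).map f ++ r.drop t := by
  induction t with
  | zero => simp [setPrefix]
  | succ t ih =>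
    unfold setPrefix at *
    rw [List.range_succ, List.foldl_append, ih (by omega)]
    have hlen : ((List.range t).map f).length = t := by simp
    have ht : t < r.length := by omega
    simp only [List.foldl_cons, List.foldl_nil]
    rw [List.set_append_right _ _ (by omega), hlen, Nat.sub_self]
    have h2 : (List.drop t r).set 0 (f t) = f t :: List.drop (t + 1) r := by
      rw [List.drop_eq_getElem_cons ht, List.set_cons_zero]
    rw [h2]
    simp

theorem foldl_set_row (f : Nat → Int) (k t : Nat) (out : List (List Int)) :
    (List.range t).foldl (fun o j => o.set k ((o.getD k []).set j (f j))) out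
      = out.set k (setPrefix (out.getD k []) f t) := by
  induction t with
  | zero =>
    by_cases hk : k < out.length
    · simp [setPrefix, List.getD_eq_getElem?_getD, hk, List.set_getElem_self]
    · simp [setPrefix, List.set_eq_of_length_le (show out.length ≤ k by omega)]
  | succ t ih =>
    rw [List.range_succ, List.foldl_append, ih]
    by_cases hk : k < out.length
    · have : (out.set k (setPrefix (out.getD k []) f t)).getD k []
          = setPrefix (out.getD k []) f t := by
        simp [List.getD_eq_getElem?_getD, hk]
      simp only [List.foldl_cons, List.foldl_nil, this, List.set_set]
      unfold setPrefix
      rw [List.range_succ, List.foldl_append]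
      rfl
    · have h1 : out.getD k [] = [] := by
        rw [List.getD_eq_getElem?_getD, List.getElem?_eq_none (show out.length ≤ k by omega)]
        rfl
      rw [h1, setPrefix_nil, setPrefix_nil,
        List.set_eq_of_length_le (show out.length ≤ k from le_of_not_gt hk)]
      simp [List.set_eq_of_length_le (show out.length ≤ k from le_of_not_gt hk)]

theorem foldl_rows (A : List (List Int)) (t : Nat) (ht : t ≤ A.length) :
    (List.range t).foldl
        (fun o k => o.set k (setPrefix (o.getD k []) (gVal A k) (A.headD []).length))
        (List.replicate A.length (List.replicate (A.headD []).length (0 : Int)))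
      = (List.range t).map (gRow A)
        ++ List.replicate (A.length - t) (List.replicate (A.headD []).length (0 : Int)) := by
  induction t with
  | zero => simp
  | succ t ih =>
    rw [List.range_succ, List.foldl_append, ih (by omega)]
    have hlen : ((List.range t).map (gRow A)).length = t := by simp
    have hget : ((List.range t).map (gRow A)
        ++ List.replicate (A.length - t) (List.replicate (A.headD []).length (0 : Int))).getD t []
        = List.replicate (A.headD []).length (0 : Int) := by
      rw [List.getD_eq_getElem?_getD, List.getElem?_append_right (by omega), hlen]
      simp [show t < A.length by omega]
    simp only [List.foldl_cons, List.foldl_nil, hget]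
    rw [setPrefix_eq _ _ _ (by simp), List.set_append_right _ _ (by omega), hlen]
    have hrep : A.length - t = (A.length - (t+1)) + 1 := by omega
    rw [hrep, List.replicate_succ]
    simp [gRow, List.drop_replicate]

theorem getD_zero_eq_headD (A : List (List Int)) : A.getD 0 [] = A.headD [] := by
  cases A <;> rfl

theorem sub_ite_collapse (a x : Int) (c : Prop) [Decidable c] :
    (if c then a - x else a) = a - (if c then x else 0) := by
  split_ifs <;> simp

theorem ite_sub_congr {c1 c2 : Prop} [Decidable c1] [Decidable c2] {a1 a2 : Int}
    (h : c1 ↔ c2) (ha : c2 → a1 = a2) :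
    (if c1 then a1 else 0) = (if c2 then a2 else 0) := by
  by_cases hc : c2
  · rw [if_pos (h.mpr hc), if_pos hc, ha hc]
  · rw [if_neg (fun hx => hc (h.mp hx)), if_neg hc]

theorem portA_eq_gather (A : List (List Int)) :
    filtreChess A = gather A := by
  unfold filtreChess gather
  simp only [PySem.List.pyRange_one, sub_zero, Int.toNat_natCast, List.foldl_map, List.map_map,
    Function.comp_def, PySem.List.pyGetD_zero, getD_zero_eq_headD, List.map_const',
    List.length_range]
  rw [List.foldl_ext _
    (fun (o : List (List Int)) (k : Nat) =>
      o.set k (setPrefix (o.getD k []) (gVal A k) (A.headD []).length))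
    _ ?_]
  · rw [foldl_rows A A.length le_rfl]
    simp
  · intro out k _
    rw [List.foldl_ext _
      (fun (o : List (List Int)) (l : Nat) =>
        o.set k ((o.getD k []).set l (gVal A k l)))
      _ ?_]
    · exact foldl_set_row (gVal A k) k (A.headD []).length out
    · intro o l _
      simp only [zero_add, PySem.List.pySetD_natCast, PySem.List.pyGetD_natCast]
      congr 1
      unfold gVal matAt
      simp only [sub_ite_collapse]
      have hL : (if ((l : Int)) > 0 then PySem.List.pyGetD (A.getD k []) ((l : Int) - 1) 0 else 0)
          = (if 0 < l then (A.getD k []).getD (l - 1) 0 else 0) :=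
        ite_sub_congr (by omega) (fun hc => by
          rw [show ((l : Int) - 1) = ((l - 1 : Nat) : Int) by omega, PySem.List.pyGetD_natCast])
      have hR : (if ((l : Int)) < ((A.headD []).length : Int) - 1
              then PySem.List.pyGetD (A.getD k []) ((l : Int) + 1) 0 else 0)
          = (if l + 1 < (A.headD []).length then (A.getD k []).getD (l + 1) 0 else 0) :=
        ite_sub_congr (by omega) (fun hc => by
          rw [show ((l : Int) + 1) = ((l + 1 : Nat) : Int) by omega, PySem.List.pyGetD_natCast])
      have hU : (if ((k : Int)) > 0 then (PySem.List.pyGetD A ((k : Int) - 1) []).getD l 0 else 0)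
          = (if 0 < k then (A.getD (k - 1) []).getD l 0 else 0) :=
        ite_sub_congr (by omega) (fun hc => by
          rw [show ((k : Int) - 1) = ((k - 1 : Nat) : Int) by omega, PySem.List.pyGetD_natCast])
      have hD : (if ((k : Int)) < (A.length : Int) - 1
              then (PySem.List.pyGetD A ((k : Int) + 1) []).getD l 0 else 0)
          = (if k + 1 < A.length then (A.getD (k + 1) []).getD l 0 else 0) :=
        ite_sub_congr (by omega) (fun hc => by
          rw [show ((k : Int) + 1) = ((k + 1 : Nat) : Int) by omega, PySem.List.pyGetD_natCast])
      rw [hL, hR, hU, hD]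

theorem zip5Row_eq (c l r u d : List Int)
    (hl : c.length ≤ l.length) (hr : c.length ≤ r.length)
    (hu : c.length ≤ u.length) (hd : c.length ≤ d.length) :
    zip5Row c l r u d = (List.range c.length).map
      (fun j => 5 * c.getD j 0 - l.getD j 0 - r.getD j 0 - u.getD j 0 - d.getD j 0) := by
  induction c generalizing l r u d with
  | nil => simp [zip5Row]
  | cons c0 cs ih =>
    cases l with
    | nil => simp at hl
    | cons l0 ls =>
      cases r with
      | nil => simp at hr
      | cons r0 rs =>
        cases u with
        | nil => simp at hu
        | cons u0 us =>
          cases d with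
          | nil => simp at hd
          | cons d0 ds =>
            simp only [zip5Row, List.length_cons, List.range_succ_eq_map, List.map_cons,
              List.map_map]
            congr 1
            rw [ih ls rs us ds (by simpa using hl) (by simpa using hr)
              (by simpa using hu) (by simpa using hd)]
            apply List.map_congr_left
            intro j _
            simp

theorem zip3Rows_eq (M U D : List (List Int))
    (hU : M.length ≤ U.length) (hD : M.length ≤ D.length) :
    zip3Rows M U D = (List.range M.length).map
      (fun i => zip5Row (M.getD i []) (0 :: (M.getD i []).dropLast)
        ((M.getD i []).tail ++ [0]) (U.getD i []) (D.getD i [])) := by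
  induction M generalizing U D with
  | nil => simp [zip3Rows]
  | cons m0 ms ih =>
    cases U with
    | nil => simp at hU
    | cons u0 us =>
      cases D with
      | nil => simp at hD
      | cons d0 ds =>
        simp only [zip3Rows, List.length_cons, List.range_succ_eq_map, List.map_cons,
          List.map_map]
        congr 1
        rw [ih us ds (by simpa using hU) (by simpa using hD)]
        apply List.map_congr_left
        intro i _
        simp

theorem getD_left_shift (row : List Int) (j : Nat) (hj : j < row.length) :
    (0 :: row.dropLast).getD j 0 = if 0 < j then row.getD (j - 1) 0 else 0 := by
  cases j with
  | zero => simp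
  | succ j =>
    have hj' : j < row.dropLast.length := by simp; omega
    simp [List.getD_eq_getElem?_getD, List.getElem?_eq_getElem hj',
      List.getElem_dropLast, List.getElem?_eq_getElem (show j < row.length by omega)]

theorem getD_right_shift (row : List Int) (j : Nat) (hj : j < row.length) :
    (row.tail ++ [0]).getD j 0 = if j + 1 < row.length then row.getD (j + 1) 0 else 0 := by
  by_cases h : j + 1 < row.length
  · have hj' : j < row.tail.length := by simp; omega
    rw [if_pos h, List.getD_eq_getElem?_getD, List.getElem?_append_left hj',
      List.getElem?_eq_getElem hj', List.getElem_tail]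
    simp [List.getD_eq_getElem?_getD, List.getElem?_eq_getElem h]
  · have hj' : j = row.length - 1 ∧ row.tail.length = j := by simp; omega
    rw [if_neg h, List.getD_eq_getElem?_getD, List.getElem?_append_right (by omega)]
    simp [hj'.2]

theorem core_eq_gather (M : List (List Int))
    (hrect : ∀ r ∈ M, r.length = (M.headD []).length) :
    zip3Rows M ((M.take 1).map (fun r => List.replicate r.length (0 : Int)) ++ M.dropLast)
      (M.tail ++ (M.drop (M.length - 1)).map (fun r => List.replicate r.length (0 : Int)))
      = gather M := by
  cases M with
  | nil => rfl
  | cons h0 tl =>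
    have hrect' : ∀ r ∈ (h0 :: tl), r.length = h0.length := by simpa using hrect
    have hn : ((h0 :: tl).headD []).length = h0.length := rfl
    set M := h0 :: tl with hM
    set n := h0.length with hndef
    have hmlen : M.length = tl.length + 1 := by simp [hM]
    have hmem : ∀ i, i < M.length → M.getD i [] ∈ M := by
      intro i hi
      rw [List.getD_eq_getElem?_getD, List.getElem?_eq_getElem hi]
      exact List.getElem_mem hi
    have hlen : ∀ i, i < M.length → (M.getD i []).length = n := fun i hi =>
      hrect' _ (hmem i hi)
    have hAlen : ((M.take 1).map (fun r => List.replicate r.length (0 : Int)) ++ M.dropLast).length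
        = M.length := by simp [hM]
    have hBlen : (M.tail ++ (M.drop (M.length - 1)).map (fun r => List.replicate r.length (0 : Int))).length
        = M.length := by simp [hM]
    rw [zip3Rows_eq _ _ _ (le_of_eq hAlen.symm) (le_of_eq hBlen.symm)]
    unfold gather
    apply List.map_congr_left
    intro i hi
    rw [List.mem_range] at hi
    have habove : ((M.take 1).map (fun r => List.replicate r.length (0 : Int)) ++ M.dropLast).getD i []
        = if 0 < i then M.getD (i - 1) [] else List.replicate n 0 := by
      cases i with
      | zero => simp [hM, hndef]
      | succ i =>
        have h1 : i < M.dropLast.length := by simp [hM]; omega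
        simp only [hM, List.take_succ_cons, List.take_zero, List.map_cons, List.map_nil,
          List.cons_append, List.nil_append, List.getD_cons_succ]
        rw [List.getD_eq_getElem?_getD, List.getElem?_eq_getElem h1, List.getElem_dropLast]
        simp [← hM, List.getD_eq_getElem?_getD, List.getElem?_eq_getElem (show i < M.length by omega)]
    have hbelow : (M.tail ++ (M.drop (M.length - 1)).map (fun r => List.replicate r.length (0 : Int))).getD i []
        = if i + 1 < M.length then M.getD (i + 1) [] else List.replicate n 0 := by
      by_cases h : i + 1 < M.length
      · have h1 : i < M.tail.length := by simp [hM]; omega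
        rw [if_pos h, List.getD_eq_getElem?_getD, List.getElem?_append_left h1,
          List.getElem?_eq_getElem h1, List.getElem_tail]
        simp [List.getD_eq_getElem?_getD, List.getElem?_eq_getElem h]
      · have h1 : M.tail.length = i := by simp [hM]; omega
        have h2 : i < M.length := hi
        rw [if_neg h, List.getD_eq_getElem?_getD, List.getElem?_append_right (by omega), h1,
          Nat.sub_self]
        have h3 : M.length - 1 = i := by omega
        rw [h3]
        have h4 : M[i].length = n := by
          have h5 := hlen i h2
          rwa [List.getD_eq_getElem?_getD, List.getElem?_eq_getElem h2] at h5
        simp [List.getElem?_map, List.getElem?_drop, List.getElem?_eq_getElem h2, h4]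
    have hup : (if 0 < i then M.getD (i - 1) [] else List.replicate n (0 : Int)).length = n := by
      split_ifs with hc
      · exact hlen _ (by omega)
      · simp
    have hdn : (if i + 1 < M.length then M.getD (i + 1) [] else List.replicate n (0 : Int)).length = n := by
      split_ifs with hc
      · exact hlen _ (by omega)
      · simp
    rw [habove, hbelow]
    rw [zip5Row_eq _ _ _ _ _ (by simp; omega) (by simp; omega)
      (by rw [hlen i hi, hup]) (by rw [hlen i hi, hdn])]
    unfold gRow
    rw [hlen i hi, hn]
    apply List.map_congr_left
    intro j hj
    rw [List.mem_range] at hj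
    have hjlt : j < (M.getD i []).length := by rw [hlen i hi]; exact hj
    rw [getD_left_shift _ j hjlt, getD_right_shift _ j hjlt]
    unfold gVal matAt
    rw [hlen i hi]
    rw [apply_ite (fun xs : List Int => xs.getD j 0), apply_ite (fun xs : List Int => xs.getD j 0)]
    have hn' : (M.head?.getD []).length = n := hn
    simp [hn']

theorem matAt_map_take (A : List (List Int)) (n i j : Nat) (hj : j < n) :
    matAt (A.map (fun r => r.take n)) i j = matAt A i j := by
  unfold matAt
  by_cases hi : i < A.length
  · have h1 : (A.map (fun r => r.take n)).getD i [] = (A.getD i []).take n := by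
      rw [List.getD_eq_getElem?_getD, List.getElem?_map, List.getElem?_eq_getElem hi,
        List.getD_eq_getElem?_getD, List.getElem?_eq_getElem hi]
      rfl
    rw [h1, List.getD_eq_getElem?_getD, List.getD_eq_getElem?_getD, List.getElem?_take]
    simp [hj]
  · have h1 : (A.map (fun r => r.take n)).getD i [] = ([] : List Int) := by
      rw [List.getD_eq_getElem?_getD, List.getElem?_eq_none (by simpa using hi)]
      rfl
    have h2 : A.getD i [] = ([] : List Int) := by
      rw [List.getD_eq_getElem?_getD, List.getElem?_eq_none (by omega)]
      rfl
    rw [h1, h2]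

theorem portB_eq_gather (A : List (List Int)) (h : Pre_filtreChess A) :
    filtreChess_alt A = gather A := by
  obtain ⟨hne, hall⟩ := h
  obtain ⟨a, as, rfl⟩ : ∃ a as, A = a :: as := by
    cases A with
    | nil => exact absurd rfl hne
    | cons a as => exact ⟨a, as, rfl⟩
  unfold filtreChess_alt
  have hhead : (a :: as).headD [] = a := rfl
  set A := a :: as with hA
  set n := (A.headD []).length with hn
  set M := A.map (fun r => r.take n) with hMdef
  have hML : M.length = A.length := by simp [hMdef]
  have hna : n = a.length := by rw [hn, hhead]
  have hMhead : (M.headD []).length = n := by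
    rw [hMdef, hA]
    simp [hna]
  have hrectM : ∀ r ∈ M, r.length = (M.headD []).length := by
    intro r hr
    rw [hMhead]
    rw [hMdef] at hr
    obtain ⟨s, hs, rfl⟩ := List.mem_map.mp hr
    have := hall s hs
    simp
    omega
  rw [core_eq_gather M hrectM]
  unfold gather gRow
  rw [hML, hMhead]
  apply List.map_congr_left
  intro i hi
  apply List.map_congr_left
  intro j hj
  rw [List.mem_range] at hi hj
  unfold gVal
  rw [hMhead, hML, ← hn]
  rw [matAt_map_take A n i j hj]
  congr 1
  · congr 1
    · congr 1
      · congr 1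
        · rw [matAt_map_take A n i (j - 1) (by omega)]
      · exact ite_congr rfl (fun hc => matAt_map_take A n i (j + 1) hc) (fun _ => rfl)
    · exact ite_congr rfl (fun _ => matAt_map_take A n (i - 1) j hj) (fun _ => rfl)
  · exact ite_congr rfl (fun _ => matAt_map_take A n (i + 1) j hj) (fun _ => rfl)

-- ===== VERDICT (by name: the statement is the Claim_ definition above) =====
theorem filtreChess_spec : Claim_equal_filtreChess := by
  intro A _ hpre
  unfold Spec_filtreChess
  rw [portA_eq_gather A, portB_eq_gather A hpre]
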